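-- pv_equiv track=rewrite | github.com/paiml/depyler | examples/hard_nested_loops.py | wave_collapse_count
-- ===== SOURCE A (Python) =====
-- def wave_collapse_count(grid: list[list[int]], threshold: int) -> int:
--     """Count cells where sum of 4-directional neighbors exceeds threshold."""
--     rows: int = len(grid)
--     cols: int = len(grid[0])
--     count: int = 0
--     for i in range(rows):
--         for j in range(cols):
--             neighbor_sum: int = 0
--             if i > 0:
--                 neighbor_sum += grid[i - 1][j]
--             if i < rows - 1:
--                 neighbor_sum += grid[i + 1][j]
--             if j > 0:
--                 neighbor_sum += grid[i][j - 1]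
--             if j < cols - 1:
--                 neighbor_sum += grid[i][j + 1]
--             if neighbor_sum > threshold:
--                 count += 1
--     return count
-- ===== SOURCE B (Python) =====
-- def wave_collapse_count(grid: list[list[int]], threshold: int) -> int:
--     """Count cells where sum of 4-directional neighbors exceeds threshold.
--
--     Scatter pass: add each cell's value into a flat neighbor-sum buffer for
--     each of its in-bounds 4-neighbors, then count buffer entries > threshold.
--     """
--     rows: int = len(grid)
--     cols: int = len(grid[0])
--     sums: list[int] = [0] * (rows * cols)
--     for i in range(rows):
--         base = i * cols
--         for j in range(cols):
--             v = grid[i][j]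
--             if i > 0:
--                 sums[base - cols + j] += v
--             if i + 1 < rows:
--                 sums[base + cols + j] += v
--             if j > 0:
--                 sums[base + j - 1] += v
--             if j + 1 < cols:
--                 sums[base + j + 1] += v
--     count = 0
--     for s in sums:
--         if s > threshold:
--             count += 1
--     return count
-- ===== Notes on version B (the rewrite author's own statement) =====
-- stated objective: alternative
-- what changed: Replaces the per-cell gather of four guarded neighbor reads with a scatter pass that accumulates each cell's value into a flat neighbor-sum buffer, followed by a separate counting pass over the buffer.
import Mathlib
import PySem

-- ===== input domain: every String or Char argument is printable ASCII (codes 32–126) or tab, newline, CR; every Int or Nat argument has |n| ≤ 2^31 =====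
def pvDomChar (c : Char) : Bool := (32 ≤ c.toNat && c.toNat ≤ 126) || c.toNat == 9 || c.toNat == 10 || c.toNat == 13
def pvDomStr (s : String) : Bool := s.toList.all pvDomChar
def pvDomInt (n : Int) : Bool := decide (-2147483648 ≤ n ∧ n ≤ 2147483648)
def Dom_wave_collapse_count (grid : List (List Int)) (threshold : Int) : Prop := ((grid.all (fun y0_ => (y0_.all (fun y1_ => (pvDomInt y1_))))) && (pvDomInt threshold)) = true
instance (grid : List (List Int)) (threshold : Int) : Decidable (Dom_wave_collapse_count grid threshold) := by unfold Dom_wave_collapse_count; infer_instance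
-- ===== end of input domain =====

-- B replaces A's per-cell gather of guarded neighbor reads by a scatter pass into a flat
-- neighbor-sum buffer plus a separate counting pass (alternative decomposition, same cost).

-- ===== PORT A =====
def wave_collapse_count (grid : List (List Int)) (threshold : Int) : Int :=
  let rows : Int := grid.length
  let cols : Int := (PySem.List.pyGetD grid 0 []).length
  (PySem.List.pyRange 0 rows 1).foldl (fun count i =>
    (PySem.List.pyRange 0 cols 1).foldl (fun count j =>
      let ns0 : Int := 0
      let ns1 : Int := if i > 0 then ns0 + PySem.List.pyGetD (PySem.List.pyGetD grid (i - 1) []) j 0 else ns0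
      let ns2 : Int := if i < rows - 1 then ns1 + PySem.List.pyGetD (PySem.List.pyGetD grid (i + 1) []) j 0 else ns1
      let ns3 : Int := if j > 0 then ns2 + PySem.List.pyGetD (PySem.List.pyGetD grid i []) (j - 1) 0 else ns2
      let ns4 : Int := if j < cols - 1 then ns3 + PySem.List.pyGetD (PySem.List.pyGetD grid i []) (j + 1) 0 else ns3
      if ns4 > threshold then count + 1 else count) count) 0

-- ===== PORT B =====
-- helper for Python's 'sums[k] += v'
def pyAddAt (sums : List Int) (k : Int) (v : Int) : List Int :=
  PySem.List.pySetD sums k (PySem.List.pyGetD sums k 0 + v)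

def wave_collapse_count_alt (grid : List (List Int)) (threshold : Int) : Int :=
  let rows : Int := grid.length
  let cols : Int := (PySem.List.pyGetD grid 0 []).length
  let sums0 : List Int := List.replicate (rows * cols).toNat 0
  let sums : List Int := (PySem.List.pyRange 0 rows 1).foldl (fun sums i =>
    let base : Int := i * cols
    (PySem.List.pyRange 0 cols 1).foldl (fun sums j =>
      let v : Int := PySem.List.pyGetD (PySem.List.pyGetD grid i []) j 0
      let s1 : List Int := if i > 0 then pyAddAt sums (base - cols + j) v else sums
      let s2 : List Int := if i + 1 < rows then pyAddAt s1 (base + cols + j) v else s1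
      let s3 : List Int := if j > 0 then pyAddAt s2 (base + j - 1) v else s2
      let s4 : List Int := if j + 1 < cols then pyAddAt s3 (base + j + 1) v else s3
      s4) sums) sums0
  sums.foldl (fun count s => if s > threshold then count + 1 else count) 0

-- ===== PRECONDITION & SPEC =====
-- Pre_ excludes exactly the inputs where Python A raises IndexError: the empty grid
-- (grid[0]) and grids with a row shorter than the first row (grid[i][j] for j < cols).
def Pre_wave_collapse_count (grid : List (List Int)) (threshold : Int) : Prop :=
  grid ≠ [] ∧ ∀ r ∈ grid, (grid.headD []).length ≤ r.length
instance (grid : List (List Int)) (threshold : Int) : Decidable (Pre_wave_collapse_count grid threshold) := by unfold Pre_wave_collapse_count; infer_instance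

def pvWitness_wave_collapse_count : List (List Int) × Int := ([[1, 2], [3, 4]], 2)

def Spec_wave_collapse_count (grid : List (List Int)) (threshold : Int) (out : Int) : Prop := out = wave_collapse_count_alt grid threshold
instance (grid : List (List Int)) (threshold : Int) (out : Int) : Decidable (Spec_wave_collapse_count grid threshold out) := by unfold Spec_wave_collapse_count; infer_instance

-- ===== CLAIM (what is proved, stated in full; the proofs are below) =====
def Claim_equal_wave_collapse_count : Prop := ∀ (grid : List (List Int)) (threshold : Int), Dom_wave_collapse_count grid threshold → Pre_wave_collapse_count grid threshold → Spec_wave_collapse_count grid threshold (wave_collapse_count grid threshold)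

-- ===== LEMMAS AND PROOFS =====

-- total Int-indexed cell read (both ports' grid[i][j])
def gAt (grid : List (List Int)) (i j : Int) : Int :=
  PySem.List.pyGetD (PySem.List.pyGetD grid i []) j 0

-- the 4-neighbor gather value of cell (p, q) in an R×C view of grid
def gGather (grid : List (List Int)) (R C p q : Nat) : Int :=
  (if 0 < p then gAt grid ((p : Int) - 1) q else 0) +
  (if p + 1 < R then gAt grid ((p : Int) + 1) q else 0) +
  (if 0 < q then gAt grid p ((q : Int) - 1) else 0) +
  (if q + 1 < C then gAt grid p ((q : Int) + 1) else 0)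

def chi (t s : Int) : Int := if s > t then 1 else 0

-- scatter a list of (index, value) update operations
def scat (ops : List (Int × Int)) (s : List Int) : List Int :=
  ops.foldl (fun s p => pyAddAt s p.1 p.2) s

-- the scatter ops generated by cell (i, j) in B's inner loop body
def opsCellN (grid : List (List Int)) (R C i j : Nat) : List (Int × Int) :=
  (if 0 < i then [((i : Int) * C - C + j, gAt grid i j)] else []) ++
  (if i + 1 < R then [((i : Int) * C + C + j, gAt grid i j)] else []) ++
  (if 0 < j then [((i : Int) * C + j - 1, gAt grid i j)] else []) ++
  (if j + 1 < C then [((i : Int) * C + j + 1, gAt grid i j)] else [])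

theorem length_pyAddAt (s : List Int) (k v : Int) : (pyAddAt s k v).length = s.length := by
  simp [pyAddAt, PySem.List.length_pySetD]

theorem length_scat (ops : List (Int × Int)) (s : List Int) : (scat ops s).length = s.length := by
  induction ops generalizing s with
  | nil => rfl
  | cons op ops ih => simp only [scat, List.foldl_cons] at *; rw [ih]; exact length_pyAddAt ..

theorem getD_set_int (s : List Int) (m k : Nat) (v : Int) :
    (s.set m v).getD k 0 = if m = k ∧ m < s.length then v else s.getD k 0 := by
  by_cases h : m = k
  · subst h
    by_cases h2 : m < s.length <;>
      simp [List.getD_eq_getElem?_getD, h2]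
  · simp [List.getD_eq_getElem?_getD, h]

theorem getD_pyAddAt (s : List Int) (m k : Nat) (v : Int) (hm : m < s.length) :
    (pyAddAt s (m : Int) v).getD k 0 = s.getD k 0 + (if m = k then v else 0) := by
  simp only [pyAddAt, PySem.List.pySetD_natCast, PySem.List.pyGetD_natCast]
  rw [getD_set_int]
  by_cases h : m = k
  · subst h; simp [hm]
  · simp [h]

theorem scat_getD (ops : List (Int × Int)) (s : List Int) (k : Nat)
    (hops : ∀ p ∈ ops, ∃ m : Nat, p.1 = (m : Int) ∧ m < s.length) :
    (scat ops s).getD k 0 = s.getD k 0 + (ops.map (fun p => if p.1 = (k : Int) then p.2 else 0)).sum := by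
  induction ops generalizing s with
  | nil => simp [scat]
  | cons op ops ih =>
    obtain ⟨m, hm1, hm2⟩ := hops op List.mem_cons_self
    have hstep : scat (op :: ops) s = scat ops (pyAddAt s op.1 op.2) := by simp [scat]
    rw [hstep, ih _ (by
      intro p hp
      obtain ⟨m', h1, h2⟩ := hops p (List.mem_cons_of_mem _ hp)
      exact ⟨m', h1, by rwa [length_pyAddAt]⟩)]
    rw [hm1, getD_pyAddAt s m k op.2 hm2]
    have : (if (op.1 = (k : Int)) then op.2 else 0) = (if m = k then op.2 else 0) := by
      rw [hm1]; by_cases h : m = k <;> simp [h]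
    simp only [List.map_cons, List.sum_cons, this]
    ring

theorem scat_append (l1 l2 : List (Int × Int)) (s : List Int) :
    scat (l1 ++ l2) s = scat l2 (scat l1 s) := by
  simp [scat, List.foldl_append]

theorem foldl_scat_eq_flatMap {α : Type} (l : List α) (g : α → List (Int × Int)) (s : List Int) :
    l.foldl (fun s x => scat (g x) s) s = scat (l.flatMap g) s := by
  induction l generalizing s with
  | nil => rfl
  | cons x l ih => simp [List.flatMap_cons, scat_append, ih]

theorem idx_lt {a j C R : Nat} (ha : a < R) (hj : j < C) : a * C + j < R * C := by
  calc a * C + j < a * C + C := by omega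
    _ = (a + 1) * C := by ring
    _ ≤ R * C := Nat.mul_le_mul_right _ ha

theorem idx_unique {C a j p q : Nat} (hj : j < C) (hq : q < C) :
    a * C + j = p * C + q ↔ a = p ∧ j = q := by
  constructor
  · intro h
    have h2 : (a * C + j) % C = j := by
      rw [Nat.add_comm, Nat.add_mul_mod_self_right]; exact Nat.mod_eq_of_lt hj
    have h1 : (p * C + q) % C = q := by
      rw [Nat.add_comm, Nat.add_mul_mod_self_right]; exact Nat.mod_eq_of_lt hq
    have hjq : j = q := by rw [← h2, h, h1]
    subst hjq
    have : a * C = p * C := by omega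
    exact ⟨Nat.eq_of_mul_eq_mul_right (by omega) this, rfl⟩
  · rintro ⟨rfl, rfl⟩; rfl

theorem sum_flatMap_int {α : Type} (l : List α) (g : α → List Int) :
    (l.flatMap g).sum = (l.map (fun x => (g x).sum)).sum := by
  induction l with
  | nil => rfl
  | cons x l ih => simp [List.flatMap_cons, ih]

theorem pick1 {α : Type} [AddCommMonoid α] (n a : Nat) (f : Nat → α) :
    ((List.range n).map (fun i => if i = a then f i else 0)).sum = if a < n then f a else 0 := by
  induction n with
  | zero => simp
  | succ n ih =>
    rw [List.range_succ, List.map_append, List.sum_append, ih]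
    by_cases h : a < n
    · have : ¬ n = a := by omega
      simp [h, this, Nat.lt_succ_of_lt h]
    · by_cases h2 : n = a <;> simp [h, h2] <;> omega

theorem pick2 {α : Type} [AddCommMonoid α] (R C a b : Nat) (f : Nat → Nat → α) :
    ((List.range R).map (fun i => ((List.range C).map (fun j => if i = a ∧ j = b then f i j else 0)).sum)).sum
      = if a < R ∧ b < C then f a b else 0 := by
  have hinner : ∀ i : Nat,
      ((List.range C).map (fun j => if i = a ∧ j = b then f i j else 0)).sum
        = if i = a then (if b < C then f i b else 0) else 0 := by
    intro i
    by_cases h : i = a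
    · have hfun : (fun j => if i = a ∧ j = b then f i j else 0)
          = (fun j => if j = b then f i j else 0) := by
        funext j; simp [h]
      rw [hfun, pick1 C b (fun j => f i j)]
      simp [h]
    · simp [h]
  rw [List.map_congr_left (fun i _ => hinner i), pick1 R a (fun i => if b < C then f i b else 0)]
  by_cases h1 : a < R <;> by_cases h2 : b < C <;> simp [h1, h2]

theorem range_mul_map {α : Type} (h : Nat → Nat → α) (R C : Nat) :
    (List.range (R * C)).map (fun k => h (k / C) (k % C))
      = (List.range R).flatMap (fun p => (List.range C).map (h p)) := by
  induction R with
  | zero => simp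
  | succ R ih =>
    rw [Nat.succ_mul, List.range_add, List.map_append, List.range_succ, List.flatMap_append, ih]
    congr 1
    rw [List.flatMap_cons, List.flatMap_nil, List.append_nil, List.map_map]
    refine List.map_congr_left ?_
    intro j hj
    have hjC : j < C := List.mem_range.mp hj
    have hC : 0 < C := by omega
    have hdiv : (R * C + j) / C = R := by
      rw [Nat.add_comm, Nat.add_mul_div_right j R hC, Nat.div_eq_of_lt hjC]; omega
    have hmod : (R * C + j) % C = j := by
      rw [Nat.add_comm, Nat.add_mul_mod_self_right, Nat.mod_eq_of_lt hjC]
    simp [hdiv, hmod]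

theorem chi_step (t c s : Int) : (if s > t then c + 1 else c) = c + chi t s := by
  unfold chi; split <;> simp

theorem count_fold (l : List Int) (t : Int) :
    l.foldl (fun c s => if s > t then c + 1 else c) 0 = (l.map (chi t)).sum := by
  have h : (fun (c : Int) s => if s > t then c + 1 else c) = (fun c s => c + chi t s) := by
    funext c s; exact chi_step t c s
  rw [h, PySem.List.foldl_add]
  simp

theorem count_nested (R C : Nat) (F : Nat → Nat → Int) (t : Int) :
    (List.range R).foldl (fun c p => (List.range C).foldl (fun c q => if F p q > t then c + 1 else c) c) 0
      = ((List.range R).map (fun p => ((List.range C).map (fun q => chi t (F p q))).sum)).sum := by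
  have h2 : (fun (c : Int) (p : Nat) => (List.range C).foldl (fun c q => if F p q > t then c + 1 else c) c)
      = (fun c p => c + ((List.range C).map (fun q => chi t (F p q))).sum) := by
    funext c p
    have h1 : (fun (c : Int) (q : Nat) => if F p q > t then c + 1 else c)
        = (fun c q => c + chi t (F p q)) := by
      funext c q; exact chi_step t c (F p q)
    rw [h1, PySem.List.foldl_add]
  rw [h2, PySem.List.foldl_add]
  simp

-- A's inner-loop body computes the gather value
theorem A_cell (grid : List (List Int)) (p q : Nat) :
    (let ns1 : Int := if (p : Int) > 0 then 0 + PySem.List.pyGetD (PySem.List.pyGetD grid ((p : Int) - 1) []) (q : Int) 0 else 0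
     let ns2 : Int := if (p : Int) < (grid.length : Int) - 1 then ns1 + PySem.List.pyGetD (PySem.List.pyGetD grid ((p : Int) + 1) []) (q : Int) 0 else ns1
     let ns3 : Int := if (q : Int) > 0 then ns2 + PySem.List.pyGetD (PySem.List.pyGetD grid (p : Int) []) ((q : Int) - 1) 0 else ns2
     if (q : Int) < (((grid.getD 0 []).length : Nat) : Int) - 1 then ns3 + PySem.List.pyGetD (PySem.List.pyGetD grid (p : Int) []) ((q : Int) + 1) 0 else ns3)
    = gGather grid grid.length (grid.getD 0 []).length p q := by
  have e1 : ((p : Int) > 0) ↔ 0 < p := by omega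
  have e2 : ((p : Int) < (grid.length : Int) - 1) ↔ p + 1 < grid.length := by omega
  have e3 : ((q : Int) > 0) ↔ 0 < q := by omega
  have e4 : ((q : Int) < (((grid.getD 0 []).length : Nat) : Int) - 1) ↔ q + 1 < (grid.getD 0 []).length := by omega
  simp only [e1, e2, e3, e4]
  unfold gGather gAt
  split_ifs <;> ring

theorem A_eq (grid : List (List Int)) (t : Int) :
    wave_collapse_count grid t
      = ((List.range grid.length).map (fun p =>
          ((List.range (grid.getD 0 []).length).map (fun q =>
            chi t (gGather grid grid.length (grid.getD 0 []).length p q))).sum)).sum := by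
  unfold wave_collapse_count
  simp only [PySem.List.pyGetD_zero, PySem.List.pyRange_zero_nat, List.foldl_map]
  rw [count_nested]
  refine congrArg List.sum (List.map_congr_left ?_)
  intro p _
  refine congrArg List.sum (List.map_congr_left ?_)
  intro q _
  exact congrArg (chi t) (A_cell grid p q)

-- B's inner-loop body is a scatter of that cell's ops
theorem scatter_cell (grid : List (List Int)) (i j : Nat) (s : List Int) :
    (let v : Int := PySem.List.pyGetD (PySem.List.pyGetD grid (i : Int) []) (j : Int) 0
     let s1 : List Int := if (i : Int) > 0 then pyAddAt s ((i : Int) * (((grid.getD 0 []).length : Nat) : Int) - (((grid.getD 0 []).length : Nat) : Int) + (j : Int)) v else s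
     let s2 : List Int := if (i : Int) + 1 < (grid.length : Int) then pyAddAt s1 ((i : Int) * (((grid.getD 0 []).length : Nat) : Int) + (((grid.getD 0 []).length : Nat) : Int) + (j : Int)) v else s1
     let s3 : List Int := if (j : Int) > 0 then pyAddAt s2 ((i : Int) * (((grid.getD 0 []).length : Nat) : Int) + (j : Int) - 1) v else s2
     if (j : Int) + 1 < (((grid.getD 0 []).length : Nat) : Int) then pyAddAt s3 ((i : Int) * (((grid.getD 0 []).length : Nat) : Int) + (j : Int) + 1) v else s3)
    = scat (opsCellN grid grid.length (grid.getD 0 []).length i j) s := by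
  have e1 : ((i : Int) > 0) ↔ 0 < i := by omega
  have e2 : ((i : Int) + 1 < (grid.length : Int)) ↔ i + 1 < grid.length := by omega
  have e3 : ((j : Int) > 0) ↔ 0 < j := by omega
  have e4 : ((j : Int) + 1 < (((grid.getD 0 []).length : Nat) : Int)) ↔ j + 1 < (grid.getD 0 []).length := by omega
  simp only [e1, e2, e3, e4]
  unfold opsCellN gAt
  by_cases h1 : 0 < i <;> by_cases h2 : i + 1 < grid.length <;>
    by_cases h3 : 0 < j <;> by_cases h4 : j + 1 < (grid.getD 0 []).length <;>
    · simp only [List.getD_eq_getElem?_getD] at h2 h4 ⊢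
      simp [h1, h2, h3, h4, scat]

-- composed nested scatter loop
theorem nested_foldl_scat {G : Nat → Nat → List Int → List Int} {g : Nat → Nat → List (Int × Int)}
    (R C : Nat) (s0 : List Int) (h : ∀ i j s, G i j s = scat (g i j) s) :
    (List.range R).foldl (fun s i => (List.range C).foldl (fun s j => G i j s) s) s0
      = scat ((List.range R).flatMap (fun i => (List.range C).flatMap (g i))) s0 := by
  have h2 : (fun (s : List Int) (i : Nat) => (List.range C).foldl (fun s j => G i j s) s)
      = (fun s i => scat ((List.range C).flatMap (g i)) s) := by
    funext s i
    have h1 : (fun (s : List Int) (j : Nat) => G i j s) = (fun s j => scat (g i j) s) := by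
      funext s j; exact h i j s
    rw [h1, foldl_scat_eq_flatMap]
  rw [h2, foldl_scat_eq_flatMap]

theorem opsCellN_bounds (grid : List (List Int)) (R C i j : Nat) (hi : i < R) (hj : j < C) :
    ∀ p ∈ opsCellN grid R C i j, ∃ m : Nat, p.1 = (m : Int) ∧ m < R * C := by
  intro p hp
  unfold opsCellN at hp
  simp only [List.mem_append] at hp
  rcases hp with ((hp | hp) | hp) | hp
  · rcases (by split at hp <;> simp_all : 0 < i ∧ p = ((i : Int) * C - C + j, gAt grid i j)) with ⟨h1, rfl⟩
    refine ⟨(i - 1) * C + j, ?_, idx_lt (by omega) hj⟩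
    push_cast [Nat.cast_sub h1]
    ring
  · rcases (by split at hp <;> simp_all : i + 1 < R ∧ p = ((i : Int) * C + C + j, gAt grid i j)) with ⟨h1, rfl⟩
    refine ⟨(i + 1) * C + j, ?_, idx_lt (by omega) hj⟩
    push_cast
    ring
  · rcases (by split at hp <;> simp_all : 0 < j ∧ p = ((i : Int) * C + j - 1, gAt grid i j)) with ⟨h1, rfl⟩
    refine ⟨i * C + (j - 1), ?_, idx_lt hi (by omega)⟩
    push_cast [Nat.cast_sub h1]
    ring
  · rcases (by split at hp <;> simp_all : j + 1 < C ∧ p = ((i : Int) * C + j + 1, gAt grid i j)) with ⟨h1, rfl⟩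
    refine ⟨i * C + (j + 1), ?_, idx_lt hi (by omega)⟩
    push_cast
    ring

-- contribution of cell (i, j)'s ops to target cell (p, q)
theorem opsCellN_contrib (grid : List (List Int)) (R C i j p q : Nat)
    (hj : j < C) (hq : q < C) :
    ((opsCellN grid R C i j).map (fun op => if op.1 = ((p * C + q : Nat) : Int) then op.2 else 0)).sum
      = (if i = p + 1 ∧ j = q then gAt grid i j else 0)
      + (if i + 1 = p ∧ j = q ∧ i + 1 < R then gAt grid i j else 0)
      + (if i = p ∧ j = q + 1 then gAt grid i j else 0)
      + (if i = p ∧ j + 1 = q ∧ j + 1 < C then gAt grid i j else 0) := by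
  unfold opsCellN
  simp only [List.map_append, List.sum_append, apply_ite (List.map (fun (op : Int × Int) => if op.1 = ((p * C + q : Nat) : Int) then op.2 else 0)), apply_ite List.sum, List.map_cons, List.map_nil, List.sum_cons, List.sum_nil]
  congr 1
  congr 1
  congr 1
  · -- up-scatter term
    by_cases h1 : 0 < i
    · have hidx : (i : Int) * C - C + j = (((i - 1) * C + j : Nat) : Int) := by
        push_cast [Nat.cast_sub h1]; ring
      rw [if_pos h1, hidx]
      simp only [Nat.cast_inj, idx_unique hj hq]
      have : (i - 1 = p ∧ j = q) ↔ (i = p + 1 ∧ j = q) := by omega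
      simp [this]
    · rw [if_neg h1]
      have : ¬ (i = p + 1 ∧ j = q) := by omega
      simp [this]
  · by_cases h1 : i + 1 < R
    · have hidx : (i : Int) * C + C + j = (((i + 1) * C + j : Nat) : Int) := by
        push_cast; ring
      rw [if_pos h1, hidx]
      simp only [Nat.cast_inj, idx_unique hj hq]
      have : (i + 1 = p ∧ j = q) ↔ (i + 1 = p ∧ j = q ∧ i + 1 < R) := by
        constructor
        · rintro ⟨a, b⟩; exact ⟨a, b, h1⟩
        · rintro ⟨a, b, _⟩; exact ⟨a, b⟩
      simp [this]
    · rw [if_neg h1]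
      have : ¬ (i + 1 = p ∧ j = q ∧ i + 1 < R) := by tauto
      simp [this]
  · by_cases h1 : 0 < j
    · have hidx : (i : Int) * C + j - 1 = ((i * C + (j - 1) : Nat) : Int) := by
        push_cast [Nat.cast_sub h1]; ring
      rw [if_pos h1, hidx]
      simp only [Nat.cast_inj, idx_unique (by omega : j - 1 < C) hq]
      have : (i = p ∧ j - 1 = q) ↔ (i = p ∧ j = q + 1) := by omega
      simp [this]
    · rw [if_neg h1]
      have : ¬ (i = p ∧ j = q + 1) := by omega
      simp [this]
  · by_cases h1 : j + 1 < C
    · have hidx : (i : Int) * C + j + 1 = ((i * C + (j + 1) : Nat) : Int) := by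
        push_cast; ring
      rw [if_pos h1, hidx]
      simp only [Nat.cast_inj, idx_unique h1 hq]
      have : (i = p ∧ j + 1 = q) ↔ (i = p ∧ j + 1 = q ∧ j + 1 < C) := by tauto
      simp [this]
    · rw [if_neg h1]
      have : ¬ (i = p ∧ j + 1 = q ∧ j + 1 < C) := by tauto
      simp [this]

-- total contribution of all cells to target cell (p, q) is the gather value
theorem B_contrib_total (grid : List (List Int)) (R C p q : Nat) (hpR : p < R) (hqC : q < C) :
    ((List.range R).map (fun i => ((List.range C).map (fun j =>
        ((opsCellN grid R C i j).map (fun op => if op.1 = ((p * C + q : Nat) : Int) then op.2 else 0)).sum)).sum)).sum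
      = gGather grid R C p q := by
  have hcell : ∀ i ∈ List.range R, ((List.range C).map (fun j =>
        ((opsCellN grid R C i j).map (fun op => if op.1 = ((p * C + q : Nat) : Int) then op.2 else 0)).sum)).sum
      = ((List.range C).map (fun j =>
          (if i = p + 1 ∧ j = q then gAt grid i j else 0)
        + (if i + 1 = p ∧ j = q ∧ i + 1 < R then gAt grid i j else 0)
        + (if i = p ∧ j = q + 1 then gAt grid i j else 0)
        + (if i = p ∧ j + 1 = q ∧ j + 1 < C then gAt grid i j else 0))).sum := by
    intro i _
    refine congrArg List.sum (List.map_congr_left ?_)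
    intro j hjmem
    exact opsCellN_contrib grid R C i j p q (List.mem_range.mp hjmem) hqC
  rw [List.map_congr_left hcell]
  simp only [PySem.List.sum_map_add_int]
  have h1 : ((List.range R).map (fun i => ((List.range C).map (fun j => if i = p + 1 ∧ j = q then gAt grid i j else 0)).sum)).sum
      = (if p + 1 < R then gAt grid ((p : Int) + 1) q else 0) := by
    rw [pick2 R C (p + 1) q (fun i j => (gAt grid i j : Int))]
    by_cases h : p + 1 < R
    · simp [h, hqC]
    · simp [h]
  have h2 : ((List.range R).map (fun i => ((List.range C).map (fun j => if i + 1 = p ∧ j = q ∧ i + 1 < R then gAt grid i j else 0)).sum)).sum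
      = (if 0 < p then gAt grid ((p : Int) - 1) q else 0) := by
    by_cases hp : 0 < p
    · have hiff : ∀ i j : Nat, (i + 1 = p ∧ j = q ∧ i + 1 < R) ↔ (i = p - 1 ∧ j = q) := by intro i j; omega
      simp only [hiff]
      rw [pick2 R C (p - 1) q (fun i j => (gAt grid i j : Int))]
      have hlt : p - 1 < R := by omega
      have hc : ((p - 1 : Nat) : Int) = (p : Int) - 1 := by omega
      simp [hlt, hqC, hp, hc]
    · have hiff : ∀ i j : Nat, ¬ (i + 1 = p ∧ j = q ∧ i + 1 < R) := by intro i j; omega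
      simp [hiff, hp]
  have h3 : ((List.range R).map (fun i => ((List.range C).map (fun j => if i = p ∧ j = q + 1 then gAt grid i j else 0)).sum)).sum
      = (if q + 1 < C then gAt grid p ((q : Int) + 1) else 0) := by
    rw [pick2 R C p (q + 1) (fun i j => (gAt grid i j : Int))]
    by_cases h : q + 1 < C
    · simp [h, hpR]
    · simp [h]
  have h4 : ((List.range R).map (fun i => ((List.range C).map (fun j => if i = p ∧ j + 1 = q ∧ j + 1 < C then gAt grid i j else 0)).sum)).sum
      = (if 0 < q then gAt grid p ((q : Int) - 1) else 0) := by
    by_cases hq0 : 0 < q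
    · have hiff : ∀ i j : Nat, (i = p ∧ j + 1 = q ∧ j + 1 < C) ↔ (i = p ∧ j = q - 1) := by intro i j; omega
      simp only [hiff]
      rw [pick2 R C p (q - 1) (fun i j => (gAt grid i j : Int))]
      have hlt : q - 1 < C := by omega
      have hc : ((q - 1 : Nat) : Int) = (q : Int) - 1 := by omega
      simp [hlt, hpR, hq0, hc]
    · have hiff : ∀ i j : Nat, ¬ (i = p ∧ j + 1 = q ∧ j + 1 < C) := by intro i j; omega
      simp [hiff, hq0]
  rw [h1, h2, h3, h4]
  unfold gGather
  ring

theorem bigops_getD (grid : List (List Int)) (R C p q : Nat) (hpR : p < R) (hqC : q < C) :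
    (scat ((List.range R).flatMap (fun i => (List.range C).flatMap (fun j => opsCellN grid R C i j)))
        (List.replicate (R * C) 0)).getD (p * C + q) 0
      = gGather grid R C p q := by
  have hops : ∀ op ∈ (List.range R).flatMap (fun i => (List.range C).flatMap (fun j => opsCellN grid R C i j)),
      ∃ m : Nat, op.1 = (m : Int) ∧ m < (List.replicate (R * C) (0 : Int)).length := by
    intro op hop
    simp only [List.mem_flatMap, List.mem_range] at hop
    obtain ⟨i, hi, j, hj, hmem⟩ := hop
    obtain ⟨m, hm1, hm2⟩ := opsCellN_bounds grid R C i j hi hj op hmem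
    exact ⟨m, hm1, by simpa using hm2⟩
  rw [scat_getD _ _ _ hops]
  have hrep : (List.replicate (R * C) (0 : Int)).getD (p * C + q) 0 = 0 := by simp
  rw [hrep, zero_add, List.map_flatMap, sum_flatMap_int]
  have hinner : ∀ i ∈ List.range R,
      (((List.range C).flatMap (fun j => opsCellN grid R C i j)).map
        (fun op => if op.1 = ((p * C + q : Nat) : Int) then op.2 else 0)).sum
      = ((List.range C).map (fun j => ((opsCellN grid R C i j).map
          (fun op => if op.1 = ((p * C + q : Nat) : Int) then op.2 else 0)).sum)).sum := by
    intro i _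
    rw [List.map_flatMap, sum_flatMap_int]
  rw [List.map_congr_left hinner]
  exact B_contrib_total grid R C p q hpR hqC

theorem sums_eq (grid : List (List Int)) (R C : Nat) :
    scat ((List.range R).flatMap (fun i => (List.range C).flatMap (fun j => opsCellN grid R C i j)))
        (List.replicate (R * C) 0)
      = (List.range (R * C)).map (fun k => gGather grid R C (k / C) (k % C)) := by
  apply List.ext_getElem
  · simp [length_scat]
  · intro k hL hR
    have h1 : k < R * C := by
      have := hL; rwa [length_scat, List.length_replicate] at this
    have hC : 0 < C := by
      rcases Nat.eq_zero_or_pos C with h | h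
      · subst h; omega
      · exact h
    have hp : k / C < R := (Nat.div_lt_iff_lt_mul hC).mpr h1
    have hq : k % C < C := Nat.mod_lt _ hC
    have hk : (k / C) * C + (k % C) = k := by
      rw [Nat.mul_comm]; exact Nat.div_add_mod k C
    rw [List.getElem_map, List.getElem_range, ← List.getD_eq_getElem _ 0 hL]
    conv_lhs => rw [← hk]
    exact bigops_getD grid R C (k / C) (k % C) hp hq

theorem B_eq (grid : List (List Int)) (t : Int) :
    wave_collapse_count_alt grid t
      = ((List.range grid.length).map (fun p =>
          ((List.range (grid.getD 0 []).length).map (fun q =>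
            chi t (gGather grid grid.length (grid.getD 0 []).length p q))).sum)).sum := by
  unfold wave_collapse_count_alt
  simp only [PySem.List.pyGetD_zero, PySem.List.pyRange_zero_nat, List.foldl_map]
  rw [count_fold]
  have htn : (((grid.length : Nat) : Int) * (((grid.getD 0 []).length : Nat) : Int)).toNat
      = grid.length * (grid.getD 0 []).length := by
    rw [show ((grid.length : Nat) : Int) * (((grid.getD 0 []).length : Nat) : Int)
        = ((grid.length * (grid.getD 0 []).length : Nat) : Int) by push_cast; ring]
    exact Int.toNat_natCast _
  rw [htn]
  refine Eq.trans (congrArg (fun l : List Int => (l.map (chi t)).sum)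
    (Eq.trans (nested_foldl_scat grid.length (grid.getD 0 []).length
        (List.replicate (grid.length * (grid.getD 0 []).length) 0)
        (fun i j s => scatter_cell grid i j s))
      (sums_eq grid grid.length (grid.getD 0 []).length))) ?_
  simp only [List.map_map, Function.comp_def]
  rw [range_mul_map (fun p q => chi t (gGather grid grid.length (grid.getD 0 []).length p q))
    grid.length (grid.getD 0 []).length]
  exact sum_flatMap_int _ _

-- ===== VERDICT (by name: the statement is the Claim_ definition above) =====
theorem wave_collapse_count_spec : Claim_equal_wave_collapse_count := by
  intro grid threshold _ _
  unfold Spec_wave_collapse_count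
  rw [A_eq, B_eq]
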